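-- pv_equiv track=rewrite | github.com/Rethy729/BaekJoon | BFS_DFS_다익스트라/미로탐색.py | grid_to_graph
-- ===== SOURCE A (Python) =====
-- def grid_to_graph(n, m, grid):
--     graph = [[] for _ in range(n * m + 1)] #graph의 index는 1-based / (1,1)에 해당하는 node는 1이고, (n, m)에 해당하는 node는 nm+1이다
--     for i in range(n):
--         for j in range(m):
--             if i != n-1:
--                 if grid[i][j] == '1' and grid[i+1][j] == '1':
--                     graph[i*m + j + 1].append((i+1)*m + j + 1)
--                     graph[(i+1)*m + j + 1].append(i*m + j + 1)
--             if j != m-1: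
--                 if grid[i][j] == '1' and grid[i][j+1] == '1':
--                     graph[i*m + j + 1].append(i*m + j + 2)
--                     graph[i*m + j + 2].append(i*m + j + 1)
--     return graph
-- ===== SOURCE B (Python) =====
-- DIRS = ((-1, 0), (0, -1), (1, 0), (0, 1))
--
-- def grid_to_graph(n, m, grid):
--     def passable(i, j):
--         return 0 <= i < n and 0 <= j < m and grid[i][j] == '1'
--     def nbrs(k):
--         i, j = divmod(k - 1, m)
--         if not passable(i, j):
--             return []
--         return [(i + di) * m + (j + dj) + 1
--                 for di, dj in DIRS if passable(i + di, j + dj)]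
--     return [nbrs(k) if k >= 1 else [] for k in range(n * m + 1)]
-- ===== Notes on version B (the rewrite author's own statement) =====
-- stated objective: idiomatic
-- what changed: B computes each node's adjacency list directly as a pure per-node comprehension (recovering the cell from the node index with divmod and filtering the four neighbours), instead of A's imperative scan that mutates the graph by pushing both directions of each of the two forward edges.
-- outside the precondition, e.g. on grid_to_graph(2, 1, [['0']]): A returns [[], [], []], B raises IndexError
import Mathlib
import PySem

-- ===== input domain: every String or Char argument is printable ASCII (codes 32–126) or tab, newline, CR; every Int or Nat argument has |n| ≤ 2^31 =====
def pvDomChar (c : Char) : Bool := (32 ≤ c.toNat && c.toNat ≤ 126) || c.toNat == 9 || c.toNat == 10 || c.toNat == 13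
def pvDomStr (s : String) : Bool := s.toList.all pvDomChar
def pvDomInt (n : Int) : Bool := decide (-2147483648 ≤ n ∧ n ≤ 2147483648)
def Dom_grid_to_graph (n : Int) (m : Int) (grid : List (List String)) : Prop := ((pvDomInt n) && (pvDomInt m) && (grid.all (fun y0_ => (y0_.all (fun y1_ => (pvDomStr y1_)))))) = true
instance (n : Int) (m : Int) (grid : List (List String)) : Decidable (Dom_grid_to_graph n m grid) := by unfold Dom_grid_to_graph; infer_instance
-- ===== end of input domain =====

-- B replaces A's mutating two-edges-per-cell scan by a pure per-node comprehension (idiomatic; same cost).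
-- Equivalence is on the return value; neither program mutates its arguments.

-- ===== PORT A =====

-- grid[i][j] (some cell, none = IndexError; indices are nonnegative in every use here, so pyGet? is exact)
def gtg_cell (grid : List (List String)) (i j : Int) : Option String :=
  (PySem.List.pyGet? grid i).bind (fun row => PySem.List.pyGet? row j)

-- graph[k].append(v); inside Pre_ every index A uses is in range, the guard is for totality only
def gtg_append (g : List (List Int)) (k : Int) (v : Int) : List (List Int) :=
  if 0 ≤ k ∧ k.toNat < g.length then g.modify k.toNat (fun xs => xs ++ [v]) else g

-- the body of A's inner loop (cell (i, j))
def gtg_step (n m : Int) (grid : List (List String)) (i : Int)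
    (g : List (List Int)) (j : Int) : List (List Int) :=
  let g1 :=
    if i ≠ n - 1 then
      if gtg_cell grid i j = some "1" ∧ gtg_cell grid (i+1) j = some "1" then
        gtg_append (gtg_append g (i*m + j + 1) ((i+1)*m + j + 1)) ((i+1)*m + j + 1) (i*m + j + 1)
      else g
    else g
  if j ≠ m - 1 then
    if gtg_cell grid i j = some "1" ∧ gtg_cell grid i (j+1) = some "1" then
      gtg_append (gtg_append g1 (i*m + j + 1) (i*m + j + 2)) (i*m + j + 2) (i*m + j + 1)
    else g1
  else g1

def grid_to_graph (n : Int) (m : Int) (grid : List (List String)) : List (List Int) :=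
  let graph := (PySem.List.pyRange 0 (n*m + 1) 1).map (fun _ => ([] : List Int))
  (PySem.List.pyRange 0 n 1).foldl
    (fun g i => (PySem.List.pyRange 0 m 1).foldl (gtg_step n m grid i) g) graph

-- ===== PORT B =====

def alt_passable (n m : Int) (grid : List (List String)) (i j : Int) : Bool :=
  decide (0 ≤ i ∧ i < n ∧ 0 ≤ j ∧ j < m ∧ gtg_cell grid i j = some "1")

def alt_dirs : List (Int × Int) := [(-1, 0), (0, -1), (1, 0), (0, 1)]

def alt_nbrs (n m : Int) (grid : List (List String)) (k : Int) : List Int :=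
  match PySem.Int.divmod? (k - 1) m with
  | some (i, j) =>
      if alt_passable n m grid i j then
        alt_dirs.filterMap (fun d =>
          if alt_passable n m grid (i + d.1) (j + d.2) then
            some ((i + d.1)*m + (j + d.2) + 1)
          else none)
      else []
  | none => []   -- unreachable: the caller only passes k ≥ 1, which forces m ≠ 0

def grid_to_graph_alt (n : Int) (m : Int) (grid : List (List String)) : List (List Int) :=
  (PySem.List.pyRange 0 (n*m + 1) 1).map
    (fun k => if 1 ≤ k then alt_nbrs n m grid k else [])

-- ===== PRECONDITION & SPEC =====
-- Pre_ excludes ill-shaped inputs (n, m ≥ 1 but fewer than n rows, or a row among the first n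
-- shorter than m): there Python A may still return thanks to short-circuit evaluation of its
-- passability tests while B's per-node scan raises IndexError.
def Pre_grid_to_graph (n : Int) (m : Int) (grid : List (List String)) : Prop :=
  n ≤ 0 ∨ m ≤ 0 ∨ (n ≤ (grid.length : Int) ∧ ∀ row ∈ grid.take n.toNat, m ≤ (row.length : Int))
instance (n : Int) (m : Int) (grid : List (List String)) : Decidable (Pre_grid_to_graph n m grid) := by
  unfold Pre_grid_to_graph; infer_instance

def pvWitness_grid_to_graph : Int × Int × List (List String) :=
  (2, 2, [["1", "1"], ["0", "1"]])

def Spec_grid_to_graph (n : Int) (m : Int) (grid : List (List String)) (out : List (List Int)) : Prop := out = grid_to_graph_alt n m grid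
instance (n : Int) (m : Int) (grid : List (List String)) (out : List (List Int)) : Decidable (Spec_grid_to_graph n m grid out) := by unfold Spec_grid_to_graph; infer_instance

-- ===== CLAIM (what is proved, stated in full; the proofs are below) =====
def Claim_equal_grid_to_graph : Prop := ∀ (n : Int) (m : Int) (grid : List (List String)), Dom_grid_to_graph n m grid → Pre_grid_to_graph n m grid → Spec_grid_to_graph n m grid (grid_to_graph n m grid)

-- ===== LEMMAS AND PROOFS =====

-- A's loop as a flat sequence of append operations (key, value)
def applyOps (g : List (List Int)) (ops : List (Int × Int)) : List (List Int) :=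
  ops.foldl (fun g p => gtg_append g p.1 p.2) g

def opsCell (n m : Int) (grid : List (List String)) (i j : Int) : List (Int × Int) :=
  (if i ≠ n - 1 ∧ (gtg_cell grid i j = some "1" ∧ gtg_cell grid (i+1) j = some "1") then
      [(i*m + j + 1, (i+1)*m + j + 1), ((i+1)*m + j + 1, i*m + j + 1)]
    else []) ++
  (if j ≠ m - 1 ∧ (gtg_cell grid i j = some "1" ∧ gtg_cell grid i (j+1) = some "1") then
      [(i*m + j + 1, i*m + j + 2), (i*m + j + 2, i*m + j + 1)]
    else [])

def aOps (n m : Int) (grid : List (List String)) : List (Int × Int) :=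
  (PySem.List.pyRange 0 n 1).flatMap (fun i =>
    (PySem.List.pyRange 0 m 1).flatMap (fun j => opsCell n m grid i j))

def keyFilter (t : Int) (p : Int × Int) : Option Int :=
  if p.1 = t then some p.2 else none

-- the adjacency list of cell (it, jt): up, left, down, right
def nbrSpec (n m : Int) (grid : List (List String)) (it jt : Int) : List Int :=
  (if 0 < it ∧ (gtg_cell grid (it-1) jt = some "1" ∧ gtg_cell grid it jt = some "1") then
      [(it-1)*m + jt + 1] else []) ++
  ((if 0 < jt ∧ (gtg_cell grid it (jt-1) = some "1" ∧ gtg_cell grid it jt = some "1") then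
      [it*m + (jt-1) + 1] else []) ++
   ((if it + 1 < n ∧ (gtg_cell grid it jt = some "1" ∧ gtg_cell grid (it+1) jt = some "1") then
      [(it+1)*m + jt + 1] else []) ++
    (if jt + 1 < m ∧ (gtg_cell grid it jt = some "1" ∧ gtg_cell grid it (jt+1) = some "1") then
      [it*m + (jt+1) + 1] else [])))

lemma getElem?_gtg_append (g : List (List Int)) (k v : Int) (t : Nat) :
    (gtg_append g k v)[t]? =
      g[t]?.map (fun xs => xs ++ if k = (t : Int) then [v] else []) := by
  unfold gtg_append
  by_cases hk : k = (t : Int)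
  · subst hk
    by_cases ht : t < g.length
    · rw [if_pos ⟨Int.natCast_nonneg t, by simpa using ht⟩]
      rw [List.getElem?_modify]
      simp
    · rw [if_neg (by simp; omega)]
      rw [List.getElem?_eq_none (by omega)]
      simp
  · have hsimp : (if k = (t : Int) then [v] else []) = [] := if_neg hk
    rw [hsimp]
    split_ifs with hg
    · rw [List.getElem?_modify_ne _ g (show k.toNat ≠ t by omega)]
      simp
    · simp

lemma getElem?_applyOps (ops : List (Int × Int)) (g : List (List Int)) (t : Nat) :
    (applyOps g ops)[t]? = g[t]?.map (fun xs => xs ++ ops.filterMap (keyFilter (t : Int))) := by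
  induction ops generalizing g with
  | nil => simp [applyOps]
  | cons p rest ih =>
    have h1 : applyOps g (p :: rest) = applyOps (gtg_append g p.1 p.2) rest := rfl
    rw [h1, ih, getElem?_gtg_append]
    cases hgt : g[t]? with
    | none => simp
    | some xs =>
      simp only [Option.map_some, List.filterMap_cons]
      by_cases hk : p.1 = (t : Int)
      · simp [keyFilter, hk, List.append_assoc]
      · simp [keyFilter, hk]

lemma applyOps_append (g : List (List Int)) (l1 l2 : List (Int × Int)) :
    applyOps g (l1 ++ l2) = applyOps (applyOps g l1) l2 := by
  simp [applyOps, List.foldl_append]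

lemma foldl_applyOps_flatMap {α : Type} (l : List α) (f : α → List (Int × Int)) (g : List (List Int)) :
    l.foldl (fun g x => applyOps g (f x)) g = applyOps g (l.flatMap f) := by
  induction l generalizing g with
  | nil => rfl
  | cons x xs ih => simp [List.foldl_cons, List.flatMap_cons, applyOps_append, ih]

lemma gtg_step_eq (n m : Int) (grid : List (List String)) (i : Int) (g : List (List Int)) (j : Int) :
    gtg_step n m grid i g j = applyOps g (opsCell n m grid i j) := by
  unfold gtg_step opsCell
  split_ifs <;> simp_all [applyOps] <;> tauto

lemma grid_to_graph_eq_applyOps (n m : Int) (grid : List (List String)) :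
    grid_to_graph n m grid =
      applyOps ((PySem.List.pyRange 0 (n*m + 1) 1).map (fun _ => ([] : List Int)))
        (aOps n m grid) := by
  unfold grid_to_graph aOps
  have h : ∀ i, gtg_step n m grid i = fun g j => applyOps g (opsCell n m grid i j) := by
    intro i; funext g j; exact gtg_step_eq n m grid i g j
  simp only [h, foldl_applyOps_flatMap]

-- cell-key injectivity over Int
lemma key_inj {m i j i' j' : Int} (hj0 : 0 ≤ j) (hj : j < m) (hj0' : 0 ≤ j') (hj' : j' < m) :
    i*m + j = i'*m + j' ↔ i = i' ∧ j = j' := by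
  constructor
  · intro h
    have hii : i = i' := by
      by_contra hne
      rcases lt_or_gt_of_ne hne with hlt | hgt
      · have : (i' - i) * m ≥ 1 * m := by
          apply mul_le_mul_of_nonneg_right _ (by omega); omega
        nlinarith
      · have : (i - i') * m ≥ 1 * m := by
          apply mul_le_mul_of_nonneg_right _ (by omega); omega
        nlinarith
    exact ⟨hii, by nlinarith [hii]⟩
  · rintro ⟨rfl, rfl⟩; rfl

lemma key_ne {m i j it jt : Int} (hj0 : 0 ≤ j) (hj : j < m) (hjt0 : 0 ≤ jt) (hjt : jt < m)
    (h : ¬(i = it ∧ j = jt)) : i*m + j + 1 ≠ it*m + jt + 1 := by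
  intro he
  exact h ((key_inj hj0 hj hjt0 hjt).mp (by omega))

-- support lemmas for flatMap over a range
lemma flatMap_pyRange_nil {α : Type} (f : Int → List α) (a b : Int)
    (h : ∀ x, a ≤ x → x < b → f x = []) :
    (PySem.List.pyRange a b 1).flatMap f = [] := by
  refine List.flatMap_eq_nil_iff.mpr ?_
  intro x hx
  rw [PySem.List.mem_pyRange_one] at hx
  exact h x hx.1 hx.2

lemma flatMap_pyRange_single {α : Type} (f : Int → List α) (a b c : Int)
    (hac : a ≤ c) (hcb : c < b)
    (h : ∀ x, a ≤ x → x < b → x ≠ c → f x = []) :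
    (PySem.List.pyRange a b 1).flatMap f = f c := by
  rw [PySem.List.pyRange_one_append a c b hac (by omega),
      PySem.List.pyRange_one_cons hcb]
  rw [List.flatMap_append, List.flatMap_cons]
  rw [flatMap_pyRange_nil f a c (fun x h1 h2 => h x h1 (by omega) (by omega)),
      flatMap_pyRange_nil f (c+1) b (fun x h1 h2 => h x (by omega) h2 (by omega))]
  simp

lemma flatMap_pyRange_two {α : Type} (f : Int → List α) (a b c d : Int)
    (hac : a ≤ c) (hcd : c < d) (hdb : d < b)
    (h : ∀ x, a ≤ x → x < b → x ≠ c → x ≠ d → f x = []) :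
    (PySem.List.pyRange a b 1).flatMap f = f c ++ f d := by
  rw [PySem.List.pyRange_one_append a (c+1) b (by omega) (by omega),
      List.flatMap_append,
      flatMap_pyRange_single f a (c+1) c hac (by omega)
        (fun x h1 h2 h3 => h x h1 (by omega) h3 (by omega)),
      flatMap_pyRange_single f (c+1) b d (by omega) hdb
        (fun x h1 h2 h3 => h x (by omega) h2 (by omega) h3)]

-- ---- per-cell evaluation of the key filter ----

lemma filter_opsCell_nil (n m : Int) (grid : List (List String)) (i j it jt : Int)
    (hj0 : 0 ≤ j) (hj : j < m) (hjt0 : 0 ≤ jt) (hjt : jt < m)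
    (h1 : ¬(i = it ∧ j = jt)) (h2 : ¬(i + 1 = it ∧ j = jt)) (h3 : ¬(i = it ∧ j + 1 = jt)) :
    (opsCell n m grid i j).filterMap (keyFilter (it*m + jt + 1)) = [] := by
  have k1 : i*m + j + 1 ≠ it*m + jt + 1 := key_ne hj0 hj hjt0 hjt h1
  have k2 : (i+1)*m + j + 1 ≠ it*m + jt + 1 := key_ne hj0 hj hjt0 hjt h2
  unfold opsCell
  rw [List.filterMap_append]
  split_ifs with hd hr hr
  · have k3 : i*m + (j+1) + 1 ≠ it*m + jt + 1 :=
      key_ne (by omega) (by omega) hjt0 hjt (by tauto)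
    have k3' : i*m + j + 2 ≠ it*m + jt + 1 := by omega
    simp [keyFilter, k1, k2, k3']
  · simp [keyFilter, k1, k2]
  · have k3 : i*m + (j+1) + 1 ≠ it*m + jt + 1 :=
      key_ne (by omega) (by omega) hjt0 hjt (by tauto)
    have k3' : i*m + j + 2 ≠ it*m + jt + 1 := by omega
    simp [keyFilter, k1, k3']
  · simp

lemma filter_opsCell_self (n m : Int) (grid : List (List String)) (it jt : Int)
    (hit0 : 0 ≤ it) (hit : it < n) (hjt0 : 0 ≤ jt) (hjt : jt < m) :
    (opsCell n m grid it jt).filterMap (keyFilter (it*m + jt + 1)) =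
      (if it + 1 < n ∧ (gtg_cell grid it jt = some "1" ∧ gtg_cell grid (it+1) jt = some "1") then
          [(it+1)*m + jt + 1] else []) ++
      (if jt + 1 < m ∧ (gtg_cell grid it jt = some "1" ∧ gtg_cell grid it (jt+1) = some "1") then
          [it*m + (jt+1) + 1] else []) := by
  have k2 : (it+1)*m + jt + 1 ≠ it*m + jt + 1 :=
    key_ne hjt0 hjt hjt0 hjt (by omega)
  unfold opsCell
  rw [List.filterMap_append]
  congr 1
  · split_ifs with h1 h2 h2
    · simp [keyFilter, k2]
    · exact absurd ⟨by omega, h1.2⟩ h2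
    · exact absurd ⟨by omega, h2.2⟩ h1
    · rfl
  · split_ifs with h1 h2 h2
    · have k3 : it*m + (jt+1) + 1 ≠ it*m + jt + 1 :=
        key_ne (by omega) (by omega) hjt0 hjt (by omega)
      have k3' : it*m + jt + 2 ≠ it*m + jt + 1 := by omega
      have hv : it*m + jt + 2 = it*m + (jt+1) + 1 := by omega
      simp [keyFilter, k3', hv]
    · exact absurd ⟨by omega, h1.2⟩ h2
    · exact absurd ⟨by omega, h2.2⟩ h1
    · rfl

lemma filter_opsCell_up (n m : Int) (grid : List (List String)) (i it jt : Int)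
    (hi0 : 0 ≤ i) (hi1 : i + 1 = it) (hit : it < n) (hjt0 : 0 ≤ jt) (hjt : jt < m) :
    (opsCell n m grid i jt).filterMap (keyFilter (it*m + jt + 1)) =
      (if gtg_cell grid i jt = some "1" ∧ gtg_cell grid (i+1) jt = some "1" then
          [i*m + jt + 1] else []) := by
  have k1 : i*m + jt + 1 ≠ it*m + jt + 1 :=
    key_ne hjt0 hjt hjt0 hjt (by omega)
  have k2 : (i+1)*m + jt + 1 = it*m + jt + 1 := by rw [hi1]
  unfold opsCell
  rw [List.filterMap_append]
  have hright : (if jt ≠ m - 1 ∧ (gtg_cell grid i jt = some "1" ∧ gtg_cell grid i (jt+1) = some "1") then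
      [(i*m + jt + 1, i*m + jt + 2), (i*m + jt + 2, i*m + jt + 1)]
    else ([] : List (Int × Int))).filterMap (keyFilter (it*m + jt + 1)) = [] := by
    split_ifs with hr
    · have k3 : i*m + (jt+1) + 1 ≠ it*m + jt + 1 :=
        key_ne (by omega) (by omega) hjt0 hjt (by omega)
      have k3' : i*m + jt + 2 ≠ it*m + jt + 1 := by omega
      simp [keyFilter, k1, k3']
    · rfl
  rw [hright, List.append_nil]
  have hne : i ≠ n - 1 := by omega
  split_ifs with hd hp hp
  · simp [keyFilter, k1, k2]
  · exact absurd hd.2 hp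
  · exact absurd ⟨hne, hp⟩ hd
  · rfl

lemma filter_opsCell_left (n m : Int) (grid : List (List String)) (j it jt : Int)
    (hit0 : 0 ≤ it) (hit : it < n) (hj0 : 0 ≤ j) (hj1 : j + 1 = jt) (hjt : jt < m) :
    (opsCell n m grid it j).filterMap (keyFilter (it*m + jt + 1)) =
      (if gtg_cell grid it j = some "1" ∧ gtg_cell grid it (j+1) = some "1" then
          [it*m + j + 1] else []) := by
  have hjm : j < m := by omega
  have k1 : it*m + j + 1 ≠ it*m + jt + 1 := key_ne hj0 hjm (by omega) hjt (by omega)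
  have k2 : (it+1)*m + j + 1 ≠ it*m + jt + 1 := key_ne hj0 hjm (by omega) hjt (by omega)
  have k3 : it*m + (j+1) + 1 = it*m + jt + 1 := by rw [hj1]
  have k3' : it*m + j + 2 = it*m + jt + 1 := by omega
  unfold opsCell
  rw [List.filterMap_append]
  have hdown : (if it ≠ n - 1 ∧ (gtg_cell grid it j = some "1" ∧ gtg_cell grid (it+1) j = some "1") then
      [(it*m + j + 1, (it+1)*m + j + 1), ((it+1)*m + j + 1, it*m + j + 1)]
    else ([] : List (Int × Int))).filterMap (keyFilter (it*m + jt + 1)) = [] := by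
    split_ifs with hd
    · simp [keyFilter, k1, k2]
    · rfl
  rw [hdown, List.nil_append]
  have hne : j ≠ m - 1 := by omega
  split_ifs with hr hp hp
  · simp [keyFilter, k1, k3']
  · exact absurd hr.2 hp
  · exact absurd ⟨hne, hp⟩ hr
  · rfl

-- ---- the crux: A's appends targeting node (it, jt) arrive in up, left, down, right order ----

lemma filter_aOps (n m : Int) (grid : List (List String)) (it jt : Int)
    (hn : 0 < n) (hm : 0 < m)
    (hit0 : 0 ≤ it) (hit : it < n) (hjt0 : 0 ≤ jt) (hjt : jt < m) :
    (aOps n m grid).filterMap (keyFilter (it*m + jt + 1)) = nbrSpec n m grid it jt := by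
  unfold aOps
  simp only [List.filterMap_flatMap]
  have hrowOther : ∀ i, ¬(i = it) → ¬(i + 1 = it) →
      (PySem.List.pyRange 0 m 1).flatMap
        (fun j => (opsCell n m grid i j).filterMap (keyFilter (it*m + jt + 1))) = [] := by
    intro i hne1 hne2
    apply flatMap_pyRange_nil
    intro j hj0 hjm
    exact filter_opsCell_nil n m grid i j it jt hj0 hjm hjt0 hjt (by tauto) (by tauto) (by tauto)
  have hrowSelf :
      (PySem.List.pyRange 0 m 1).flatMap
        (fun j => (opsCell n m grid it j).filterMap (keyFilter (it*m + jt + 1))) =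
      (if 0 < jt ∧ (gtg_cell grid it (jt-1) = some "1" ∧ gtg_cell grid it jt = some "1") then
          [it*m + (jt-1) + 1] else []) ++
      ((if it + 1 < n ∧ (gtg_cell grid it jt = some "1" ∧ gtg_cell grid (it+1) jt = some "1") then
          [(it+1)*m + jt + 1] else []) ++
       (if jt + 1 < m ∧ (gtg_cell grid it jt = some "1" ∧ gtg_cell grid it (jt+1) = some "1") then
          [it*m + (jt+1) + 1] else [])) := by
    by_cases hjtpos : 0 < jt
    · rw [flatMap_pyRange_two _ 0 m (jt-1) jt (by omega) (by omega) hjt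
        (fun j hj0 hjm hne1 hne2 =>
          filter_opsCell_nil n m grid it j it jt hj0 hjm hjt0 hjt
            (by rintro ⟨_, h⟩; exact hne2 h)
            (by rintro ⟨h, _⟩; omega)
            (by rintro ⟨_, h⟩; omega))]
      rw [filter_opsCell_left n m grid (jt-1) it jt hit0 hit (by omega) (by omega) hjt]
      rw [filter_opsCell_self n m grid it jt hit0 hit hjt0 hjt]
      rw [show jt - 1 + 1 = jt from by omega]
      simp [hjtpos, List.append_assoc]
    · rw [flatMap_pyRange_single _ 0 m jt hjt0 hjt
        (fun j hj0 hjm hne =>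
          filter_opsCell_nil n m grid it j it jt hj0 hjm hjt0 hjt
            (by rintro ⟨_, h⟩; exact hne h)
            (by rintro ⟨h, _⟩; omega)
            (by rintro ⟨_, h⟩; omega))]
      rw [filter_opsCell_self n m grid it jt hit0 hit hjt0 hjt]
      simp [hjtpos, List.append_assoc]
  by_cases hitpos : 0 < it
  · rw [flatMap_pyRange_two _ 0 n (it-1) it (by omega) (by omega) hit
      (fun i hi0 hin hne1 hne2 => hrowOther i hne2 (by omega))]
    have hrowUp :
        (PySem.List.pyRange 0 m 1).flatMap
          (fun j => (opsCell n m grid (it-1) j).filterMap (keyFilter (it*m + jt + 1))) =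
        (if gtg_cell grid (it-1) jt = some "1" ∧ gtg_cell grid it jt = some "1" then
            [(it-1)*m + jt + 1] else []) := by
      rw [flatMap_pyRange_single _ 0 m jt hjt0 hjt
        (fun j hj0 hjm hne =>
          filter_opsCell_nil n m grid (it-1) j it jt hj0 hjm hjt0 hjt
            (by rintro ⟨h, _⟩; omega)
            (by rintro ⟨_, h⟩; exact hne h)
            (by rintro ⟨h, _⟩; omega))]
      rw [filter_opsCell_up n m grid (it-1) it jt (by omega) (by omega) hit hjt0 hjt]
      rw [show it - 1 + 1 = it from by omega]
    rw [hrowUp, hrowSelf]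
    unfold nbrSpec
    simp [hitpos]
  · rw [flatMap_pyRange_single _ 0 n it hit0 hit
      (fun i hi0 hin hne => hrowOther i hne (by omega))]
    rw [hrowSelf]
    unfold nbrSpec
    simp [hitpos]

-- node 0 receives no append
lemma filter_aOps_zero (n m : Int) (grid : List (List String)) (hm : 0 < m) :
    (aOps n m grid).filterMap (keyFilter 0) = [] := by
  apply List.filterMap_eq_nil_iff.mpr
  intro p hp
  unfold aOps at hp
  simp only [List.mem_flatMap, PySem.List.mem_pyRange_one] at hp
  obtain ⟨i, ⟨hi0, hin⟩, j, ⟨hj0, hjm⟩, hmem⟩ := hp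
  have him : 0 ≤ i*m := mul_nonneg hi0 (le_of_lt hm)
  have him2 : 0 ≤ (i+1)*m := mul_nonneg (by omega) (le_of_lt hm)
  unfold opsCell at hmem
  unfold keyFilter
  rcases List.mem_append.mp hmem with h | h <;>
    split_ifs at h with hc <;>
    simp only [List.mem_cons, List.not_mem_nil, or_false] at h <;>
    rcases h with rfl | rfl <;>
    · apply if_neg
      intro he
      simp only at he
      omega

-- divmod of a node key recovers the cell
lemma divmod_key (m it jt : Int) (hm : 0 < m) (hjt0 : 0 ≤ jt) (hjt : jt < m) :
    PySem.Int.divmod? (it*m + jt + 1 - 1) m = some (it, jt) := by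
  have h1 : it*m + jt + 1 - 1 = it*m + jt := by ring
  rw [h1]
  have hq : PySem.Int.floordiv (it*m + jt) m = it := by
    rw [PySem.Int.floordiv_eq_iff_of_pos hm]
    have hms : (it+1)*m = it*m + m := by ring
    constructor <;> omega
  have hr : PySem.Int.mod (it*m + jt) m = jt := by
    have := PySem.Int.floordiv_mul_add_mod (it*m + jt) m
    rw [hq] at this
    omega
  have hd : PySem.Int.divmod? (it*m + jt) m =
      some (PySem.Int.floordiv (it*m + jt) m, PySem.Int.mod (it*m + jt) m) := by
    simp [PySem.Int.divmod?, PySem.Int.floordiv, PySem.Int.mod, hm.ne']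
  rw [hd, hq, hr]

lemma alt_nbrs_eq (n m : Int) (grid : List (List String)) (it jt : Int)
    (hn : 0 < n) (hm : 0 < m)
    (hit0 : 0 ≤ it) (hit : it < n) (hjt0 : 0 ≤ jt) (hjt : jt < m) :
    alt_nbrs n m grid (it*m + jt + 1) = nbrSpec n m grid it jt := by
  unfold alt_nbrs
  rw [divmod_key m it jt hm hjt0 hjt]
  show (if alt_passable n m grid it jt then
          alt_dirs.filterMap (fun d =>
            if alt_passable n m grid (it + d.1) (jt + d.2) then
              some ((it + d.1)*m + (jt + d.2) + 1)
            else none)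
        else []) = nbrSpec n m grid it jt
  by_cases hp : gtg_cell grid it jt = some "1"
  · have hpass : alt_passable n m grid it jt = true := by
      simp only [alt_passable, decide_eq_true_eq]
      exact ⟨hit0, hit, hjt0, hjt, hp⟩
    rw [if_pos hpass]
    have canon : nbrSpec n m grid it jt =
        (if alt_passable n m grid (it + -1) jt then [(it + -1)*m + jt + 1] else []) ++
        ((if alt_passable n m grid it (jt + -1) then [it*m + (jt + -1) + 1] else []) ++
         ((if alt_passable n m grid (it + 1) jt then [(it + 1)*m + jt + 1] else []) ++
          (if alt_passable n m grid it (jt + 1) then [it*m + (jt + 1) + 1] else []))) := by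
      unfold nbrSpec
      congr 1
      · by_cases hc : alt_passable n m grid (it + -1) jt = true
        · simp only [alt_passable, decide_eq_true_eq] at hc
          obtain ⟨h1, h2, h3, h4, h5⟩ := hc
          rw [if_pos ⟨by omega, by rwa [show it - 1 = it + -1 from by ring], hp⟩]
          rw [if_pos (by simp only [alt_passable, decide_eq_true_eq]; exact ⟨h1, h2, h3, h4, h5⟩)]
          simp [sub_eq_add_neg]
        · have hna : ¬(0 < it ∧ (gtg_cell grid (it-1) jt = some "1" ∧ gtg_cell grid it jt = some "1")) := by
            rintro ⟨hi, hcell, -⟩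
            apply hc
            simp only [alt_passable, decide_eq_true_eq]
            exact ⟨by omega, by omega, by omega, by omega,
              by rwa [show it + -1 = it - 1 from by ring]⟩
          rw [if_neg hna, if_neg hc]
      congr 1
      · by_cases hc : alt_passable n m grid it (jt + -1) = true
        · simp only [alt_passable, decide_eq_true_eq] at hc
          obtain ⟨h1, h2, h3, h4, h5⟩ := hc
          rw [if_pos ⟨by omega, by rwa [show jt - 1 = jt + -1 from by ring], hp⟩]
          rw [if_pos (by simp only [alt_passable, decide_eq_true_eq]; exact ⟨h1, h2, h3, h4, h5⟩)]
          simp [sub_eq_add_neg]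
        · have hna : ¬(0 < jt ∧ (gtg_cell grid it (jt-1) = some "1" ∧ gtg_cell grid it jt = some "1")) := by
            rintro ⟨hj, hcell, -⟩
            apply hc
            simp only [alt_passable, decide_eq_true_eq]
            exact ⟨by omega, by omega, by omega, by omega,
              by rwa [show jt + -1 = jt - 1 from by ring]⟩
          rw [if_neg hna, if_neg hc]
      congr 1
      · by_cases hc : alt_passable n m grid (it + 1) jt = true
        · simp only [alt_passable, decide_eq_true_eq] at hc
          obtain ⟨h1, h2, h3, h4, h5⟩ := hc
          rw [if_pos ⟨by omega, hp, h5⟩]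
          rw [if_pos (by simp only [alt_passable, decide_eq_true_eq]; exact ⟨h1, h2, h3, h4, h5⟩)]
        · have hna : ¬(it + 1 < n ∧ (gtg_cell grid it jt = some "1" ∧ gtg_cell grid (it+1) jt = some "1")) := by
            rintro ⟨hi, -, hcell⟩
            apply hc
            simp only [alt_passable, decide_eq_true_eq]
            exact ⟨by omega, by omega, by omega, by omega, hcell⟩
          rw [if_neg hna, if_neg hc]
      · by_cases hc : alt_passable n m grid it (jt + 1) = true
        · simp only [alt_passable, decide_eq_true_eq] at hc
          obtain ⟨h1, h2, h3, h4, h5⟩ := hc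
          rw [if_pos ⟨by omega, hp, h5⟩]
          rw [if_pos (by simp only [alt_passable, decide_eq_true_eq]; exact ⟨h1, h2, h3, h4, h5⟩)]
        · have hna : ¬(jt + 1 < m ∧ (gtg_cell grid it jt = some "1" ∧ gtg_cell grid it (jt+1) = some "1")) := by
            rintro ⟨hj, -, hcell⟩
            apply hc
            simp only [alt_passable, decide_eq_true_eq]
            exact ⟨by omega, by omega, by omega, by omega, hcell⟩
          rw [if_neg hna, if_neg hc]
    rw [canon]
    cases hb1 : alt_passable n m grid (it + -1) jt <;>
      cases hb2 : alt_passable n m grid it (jt + -1) <;>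
        cases hb3 : alt_passable n m grid (it + 1) jt <;>
          cases hb4 : alt_passable n m grid it (jt + 1) <;>
            simp [alt_dirs, hb1, hb2, hb3, hb4]
  · have hpass : alt_passable n m grid it jt = false := by
      simp only [alt_passable, decide_eq_false_iff_not]
      rintro ⟨-, -, -, -, h5⟩
      exact hp h5
    rw [hpass]
    simp only [Bool.false_eq_true, if_false]
    unfold nbrSpec
    simp [hp]

lemma alt_nbrs_degenerate (n m : Int) (grid : List (List String)) (k : Int)
    (hdeg : n ≤ 0 ∨ m ≤ 0) :
    alt_nbrs n m grid k = [] := by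
  unfold alt_nbrs
  rcases eq_or_ne m 0 with hm0 | hm0
  · simp [PySem.Int.divmod?, hm0]
  · have hd : PySem.Int.divmod? (k - 1) m =
        some (PySem.Int.floordiv (k - 1) m, PySem.Int.mod (k - 1) m) := by
      simp [PySem.Int.divmod?, PySem.Int.floordiv, PySem.Int.mod, hm0]
    rw [hd]
    show (if alt_passable n m grid (PySem.Int.floordiv (k - 1) m) (PySem.Int.mod (k - 1) m) then
            alt_dirs.filterMap (fun d =>
              if alt_passable n m grid (PySem.Int.floordiv (k - 1) m + d.1) (PySem.Int.mod (k - 1) m + d.2) then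
                some ((PySem.Int.floordiv (k - 1) m + d.1)*m + (PySem.Int.mod (k - 1) m + d.2) + 1)
              else none)
          else []) = []
    have hpass : alt_passable n m grid (PySem.Int.floordiv (k - 1) m) (PySem.Int.mod (k - 1) m) = false := by
      simp only [alt_passable, decide_eq_false_iff_not]
      intro ⟨h1, h2, h3, h4, _⟩
      rcases hdeg with hn | hm
      · omega
      · omega
    rw [hpass]
    simp

lemma ports_eq (n m : Int) (grid : List (List String)) :
    grid_to_graph n m grid = grid_to_graph_alt n m grid := by
  rcases le_or_gt n 0 with hn | hn
  · unfold grid_to_graph grid_to_graph_alt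
    rw [PySem.List.pyRange_one_eq_nil hn, List.foldl_nil]
    refine List.map_eq_map_iff.mpr ?_
    intro k hk
    by_cases hk1 : 1 ≤ k
    · rw [if_pos hk1, alt_nbrs_degenerate n m grid k (Or.inl hn)]
    · rw [if_neg hk1]
  · rcases le_or_gt m 0 with hm | hm
    · unfold grid_to_graph grid_to_graph_alt
      rw [PySem.List.pyRange_one_eq_nil hm]
      simp only [List.foldl_nil]
      rw [List.foldl_fixed]
      refine List.map_eq_map_iff.mpr ?_
      intro k hk
      by_cases hk1 : 1 ≤ k
      · rw [if_pos hk1, alt_nbrs_degenerate n m grid k (Or.inr hm)]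
      · rw [if_neg hk1]
    · rw [grid_to_graph_eq_applyOps]
      unfold grid_to_graph_alt
      apply List.ext_getElem?
      intro t
      rw [getElem?_applyOps]
      simp only [List.getElem?_map, PySem.List.getElem?_pyRange_one]
      by_cases ht : t < (n*m + 1 - 0).toNat
      · rw [if_pos ht]
        simp only [Option.map_some, zero_add]
        by_cases ht1 : 1 ≤ (t : Int)
        · have ht0 : 0 ≤ (t : Int) - 1 := by omega
          have htn : (t : Int) - 1 < n*m := by omega
          set q := PySem.Int.floordiv ((t : Int) - 1) m with hqdef
          set r := PySem.Int.mod ((t : Int) - 1) m with hrdef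
          have hq0 : 0 ≤ q := by
            rw [hqdef, PySem.Int.floordiv_eq_ediv_of_pos hm]
            exact Int.ediv_nonneg ht0 (by omega)
          have hqn : q < n := by
            rw [hqdef]
            rw [PySem.Int.floordiv_lt_iff_lt_mul hm]
            omega
          have hr0 : 0 ≤ r := PySem.Int.mod_nonneg _ hm
          have hrm : r < m := PySem.Int.mod_lt _ hm
          have hkey : (t : Int) = q*m + r + 1 := by
            have := PySem.Int.floordiv_mul_add_mod ((t : Int) - 1) m
            rw [← hqdef, ← hrdef] at this
            omega
          rw [if_pos ht1, hkey]
          rw [filter_aOps n m grid q r hn hm hq0 hqn hr0 hrm,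
              alt_nbrs_eq n m grid q r hn hm hq0 hqn hr0 hrm]
          simp
        · have ht0 : (t : Int) = 0 := by omega
          rw [if_neg ht1, ht0, filter_aOps_zero n m grid hm]
          simp
      · rw [if_neg ht]
        simp

-- ===== VERDICT (by name: the statement is the Claim_ definition above) =====
theorem grid_to_graph_spec : Claim_equal_grid_to_graph := by
  intro n m grid _ _
  unfold Spec_grid_to_graph
  exact ports_eq n m grid
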